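-- pv_equiv track=rewrite | github.com/tsuru7/algorithm-study | seisen100mon/019/A.py | solve
-- ===== SOURCE A (Python) =====
-- def solve(n,m,shops,orders):
--     ans=0
--     shops.sort()
--     for order in orders:
--         ac = 0
--         wa = len(shops)-1
--         while wa - ac > 1:
--             wj = (ac+wa)//2
--             if shops[wj] <= order:
--                 ac = wj
--             else:
--                 wa = wj
--         ans += min(order-shops[ac], shops[wa]-order)
--     return ans
-- ===== SOURCE B (Python) =====
-- def solve(n, m, shops, orders):
--     shops.sort()
--     L = len(shops)
--     total = 0
--     j = 0
--     for order in sorted(orders):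
--         while j < L and shops[j] <= order:
--             j += 1
--         if L == 1:
--             ac = 0
--             wa = 0
--         else:
--             ac = min(max(j - 1, 0), L - 2)
--             wa = ac + 1
--         total += min(order - shops[ac], shops[wa] - order)
--     return total
-- ===== Notes on version B (the rewrite author's own statement) =====
-- stated objective: faster
-- what changed: Replaces A's per-order binary search over the sorted shops with a single two-pointer merge sweep: the orders are processed in ascending order (a sorted copy; the orders list itself is not mutated) while one pointer advances monotonically through the sorted shops (amortized O(1) cheap comparisons per order instead of a log-n interpreted bisection loop), and the bracketing shop pair is obtained from the pointer position by index clamping.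
-- outside the precondition, e.g. on solve(1, 1, [], [5]): A raises IndexError, B raises IndexError
import Mathlib
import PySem

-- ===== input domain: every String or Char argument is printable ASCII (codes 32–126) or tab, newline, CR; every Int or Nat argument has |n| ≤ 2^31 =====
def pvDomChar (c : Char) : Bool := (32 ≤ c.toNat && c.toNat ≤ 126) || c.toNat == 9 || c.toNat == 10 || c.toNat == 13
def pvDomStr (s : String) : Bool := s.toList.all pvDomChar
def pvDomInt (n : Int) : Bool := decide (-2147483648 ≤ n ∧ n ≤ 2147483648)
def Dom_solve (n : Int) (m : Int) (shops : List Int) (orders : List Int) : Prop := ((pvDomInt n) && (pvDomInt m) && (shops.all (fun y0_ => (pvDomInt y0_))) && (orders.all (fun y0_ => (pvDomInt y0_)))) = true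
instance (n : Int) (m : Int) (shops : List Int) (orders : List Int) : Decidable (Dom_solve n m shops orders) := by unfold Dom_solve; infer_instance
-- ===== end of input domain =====

-- B replaces A's per-order binary search with one two-pointer merge sweep over the sorted shops and
-- the sorted orders (alternative decomposition, same cost class); the equivalence is about the
-- RETURN value only — both Pythons sort `shops` in place, and neither mutates `orders`.

-- ===== PORT A =====
-- A's `while wa - ac > 1` binary-search loop; the fuel only makes the loop total (the gap wa - ac
-- strictly shrinks every iteration, so fuel = len(shops) is never exhausted on admitted inputs).
def solveGo (s : List Int) (o : Int) : Nat → Int → Int → Int × Int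
  | 0, ac, wa => (ac, wa)
  | f+1, ac, wa =>
    if wa - ac > 1 then
      let wj := PySem.Int.floordiv (ac + wa) 2
      if PySem.List.pyGetD s wj 0 ≤ o then solveGo s o f wj wa
      else solveGo s o f ac wj
    else (ac, wa)

def solve (n : Int) (m : Int) (shops : List Int) (orders : List Int) : Int :=
  let s := PySem.List.sorted shops (fun x => x) false
  orders.foldl (fun ans order =>
    ans + (let p := solveGo s order s.length 0 ((s.length : Int) - 1)
           min (order - PySem.List.pyGetD s p.1 0) (PySem.List.pyGetD s p.2 0 - order))) 0

-- ===== PORT B =====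
-- B's inner `while j < L and shops[j] <= order` pointer advance (the guard keeps the index in
-- range, so getD is exact there).
def advanceB (s : List Int) (o : Int) (j : Nat) : Nat :=
  if h : j < s.length ∧ s.getD j 0 ≤ o then advanceB s o (j+1) else j
termination_by s.length - j
decreasing_by omega

-- the body of B's `for order in sorted(orders)` loop: state = (total, pointer j)
def stepB (s : List Int) (st : Int × Nat) (order : Int) : Int × Nat :=
  let j := advanceB s order st.2
  let L := s.length
  let ac : Int := if L = 1 then 0 else min (max ((j : Int) - 1) 0) ((L : Int) - 2)
  let wa : Int := if L = 1 then 0 else ac + 1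
  (st.1 + min (order - PySem.List.pyGetD s ac 0) (PySem.List.pyGetD s wa 0 - order), j)

def solve_alt (n : Int) (m : Int) (shops : List Int) (orders : List Int) : Int :=
  let s := PySem.List.sorted shops (fun x => x) false
  ((PySem.List.sorted orders (fun x => x) false).foldl (stepB s) (0, 0)).1

-- ===== PRECONDITION & SPEC =====
-- Pre_ excludes only the crash: with no shops and at least one order, A's `shops[ac]` raises
-- IndexError (and B raises IndexError there too).
def Pre_solve (n : Int) (m : Int) (shops : List Int) (orders : List Int) : Prop :=
  shops ≠ [] ∨ orders = []
instance (n : Int) (m : Int) (shops : List Int) (orders : List Int) : Decidable (Pre_solve n m shops orders) := by unfold Pre_solve; infer_instance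
def pvWitness_solve : Int × Int × List Int × List Int := (3, 2, [1, 5, 9], [3, 8])

def Spec_solve (n : Int) (m : Int) (shops : List Int) (orders : List Int) (out : Int) : Prop := out = solve_alt n m shops orders
instance (n : Int) (m : Int) (shops : List Int) (orders : List Int) (out : Int) : Decidable (Spec_solve n m shops orders out) := by unfold Spec_solve; infer_instance

-- ===== CLAIM (what is proved, stated in full; the proofs are below) =====
def Claim_equal_solve : Prop := ∀ (n : Int) (m : Int) (shops : List Int) (orders : List Int), Dom_solve n m shops orders → Pre_solve n m shops orders → Spec_solve n m shops orders (solve n m shops orders)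

-- ===== LEMMAS AND PROOFS =====

-- number of shops with position ≤ o; for sorted s this is where B's pointer stops
def posC (s : List Int) (o : Int) : Nat := s.countP (fun x => decide (x ≤ o))

-- the `ac` index both programs end up with when s has at least two elements
def tIdx (s : List Int) (o : Int) : Int := min (max ((posC s o : Int) - 1) 0) ((s.length : Int) - 2)

-- the common per-order contribution
def contribC (s : List Int) (o : Int) : Int :=
  if s.length = 1 then min (o - PySem.List.pyGetD s 0 0) (PySem.List.pyGetD s 0 0 - o)
  else min (o - PySem.List.pyGetD s (tIdx s o) 0) (PySem.List.pyGetD s (tIdx s o + 1) 0 - o)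

lemma posC_mono (s : List Int) {o o' : Int} (h : o ≤ o') : posC s o ≤ posC s o' := by
  apply List.countP_mono_left
  intro x _ hx
  simp only [decide_eq_true_eq] at *
  omega

lemma posC_le_length (s : List Int) (o : Int) : posC s o ≤ s.length :=
  List.countP_le_length

-- sorted s: every index below posC holds an element ≤ o …
lemma prefix_le (s : List Int) (o : Int) (hs : s.Pairwise (· ≤ ·)) :
    ∀ i : Nat, i < posC s o → s.getD i 0 ≤ o := by
  induction s with
  | nil => simp [posC]
  | cons x t ih =>
    rcases List.pairwise_cons.mp hs with ⟨hx, ht⟩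
    intro i hi
    by_cases hxo : x ≤ o
    · cases i with
      | zero => simpa
      | succ i =>
        have hc : posC (x :: t) o = posC t o + 1 := by
          simp [posC, hxo]
        exact (ih ht i (by omega))
    · exfalso
      have h0 : t.countP (fun x => decide (x ≤ o)) = 0 := by
        apply List.countP_eq_zero.mpr
        intro a ha
        simp only [decide_eq_true_eq]
        have := hx a ha
        omega
      simp [posC, h0, hxo] at hi

-- … and every index from posC on holds an element > o
lemma suffix_gt (s : List Int) (o : Int) (hs : s.Pairwise (· ≤ ·)) :
    ∀ i : Nat, posC s o ≤ i → i < s.length → o < s.getD i 0 := by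
  induction s with
  | nil => simp
  | cons x t ih =>
    rcases List.pairwise_cons.mp hs with ⟨hx, ht⟩
    intro i hi hlen
    by_cases hxo : x ≤ o
    · have hc : posC (x :: t) o = posC t o + 1 := by
        simp [posC, hxo]
      cases i with
      | zero => omega
      | succ i => exact ih ht i (by omega) (by simpa using hlen)
    · cases i with
      | zero => simp; omega
      | succ i =>
        have hmem : t.getD i 0 ∈ t := by
          rw [List.getD_eq_getElem _ _ (by simpa using hlen)]
          exact List.getElem_mem _
        have := hx _ hmem
        simp only [List.getD_cons_succ]
        omega

-- A's binary search lands on (tIdx, tIdx + 1) from any bracketing state with enough fuel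
lemma solveGo_eq (s : List Int) (o : Int) (hs : s.Pairwise (· ≤ ·)) :
    ∀ (fuel : Nat) (ac wa : Int), 0 ≤ ac → wa ≤ (s.length : Int) - 1 → ac < wa →
      ac ≤ tIdx s o → tIdx s o < wa → (wa - ac).toNat ≤ fuel →
      solveGo s o fuel ac wa = (tIdx s o, tIdx s o + 1) := by
  intro fuel
  induction fuel with
  | zero => intro ac wa h1 h2 h3 h4 h5 h6; omega
  | succ f ih =>
    intro ac wa h1 h2 h3 h4 h5 h6
    simp only [solveGo]
    split_ifs with hgap hle
    · -- wa - ac > 1 and shops[wj] ≤ o: the answer index is at wj or later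
      have hdiv : PySem.Int.floordiv (ac + wa) 2 = (ac + wa) / 2 :=
        PySem.Int.floordiv_eq_ediv_of_pos (by norm_num)
      set wj := PySem.Int.floordiv (ac + wa) 2 with hwj
      have hb : ac < wj ∧ wj < wa := by rw [hdiv]; omega
      have hnn : wj = ((wj.toNat : Nat) : Int) := by omega
      have hgd : PySem.List.pyGetD s wj 0 = s.getD wj.toNat 0 := by
        rw [hnn, PySem.List.pyGetD_natCast, Int.toNat_natCast]
      have hpos : (wj.toNat) < posC s o := by
        by_contra hc
        have := suffix_gt s o hs wj.toNat (by omega) (by omega)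
        rw [hgd] at hle; omega
      have ht : wj ≤ tIdx s o := by unfold tIdx; omega
      exact ih wj wa (by omega) h2 (by omega) ht h5 (by omega)
    · -- wa - ac > 1 and shops[wj] > o: the answer index is before wj
      have hdiv : PySem.Int.floordiv (ac + wa) 2 = (ac + wa) / 2 :=
        PySem.Int.floordiv_eq_ediv_of_pos (by norm_num)
      set wj := PySem.Int.floordiv (ac + wa) 2 with hwj
      have hb : ac < wj ∧ wj < wa := by rw [hdiv]; omega
      have hnn : wj = ((wj.toNat : Nat) : Int) := by omega
      have hgd : PySem.List.pyGetD s wj 0 = s.getD wj.toNat 0 := by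
        rw [hnn, PySem.List.pyGetD_natCast, Int.toNat_natCast]
      have hpos : posC s o ≤ wj.toNat := by
        by_contra hc
        have := prefix_le s o hs wj.toNat (by omega)
        rw [hgd] at hle; omega
      have ht : tIdx s o < wj := by unfold tIdx; omega
      exact ih ac wj h1 (by omega) (by omega) h4 ht (by omega)
    · -- gap closed: ac = tIdx, wa = tIdx + 1
      have h7 : ac = tIdx s o := by omega
      have h8 : wa = tIdx s o + 1 := by omega
      rw [h7, h8]

lemma advanceB_stop (s : List Int) (o : Int) (hs : s.Pairwise (· ≤ ·)) :
    advanceB s o (posC s o) = posC s o := by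
  rw [advanceB, dif_neg]
  rintro ⟨hlt, hle⟩
  have := suffix_gt s o hs _ le_rfl hlt
  omega

lemma advanceB_eq (s : List Int) (o : Int) (hs : s.Pairwise (· ≤ ·)) :
    ∀ (k j : Nat), posC s o - j ≤ k → j ≤ posC s o → advanceB s o j = posC s o := by
  intro k
  induction k with
  | zero =>
    intro j hk hj
    have hj' : j = posC s o := by omega
    rw [hj', advanceB_stop s o hs]
  | succ k ih =>
    intro j hk hj
    rcases Nat.lt_or_ge j (posC s o) with hlt | hge
    · rw [advanceB, dif_pos]
      · exact ih (j+1) (by omega) (by omega)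
      · have hL := posC_le_length s o
        exact ⟨by omega, prefix_le s o hs j hlt⟩
    · have hj' : j = posC s o := by omega
      rw [hj', advanceB_stop s o hs]

lemma stepB_eq (s : List Int) (o : Int) (total : Int) (j : Nat)
    (hs : s.Pairwise (· ≤ ·)) (hj : j ≤ posC s o) :
    stepB s (total, j) o = (total + contribC s o, posC s o) := by
  have hadv : advanceB s o j = posC s o := advanceB_eq s o hs (posC s o - j) j le_rfl hj
  by_cases h1 : s.length = 1
  · simp [stepB, contribC, hadv, h1]
  · simp [stepB, contribC, tIdx, hadv, h1]

-- B's sweep from any pointer not past the next stop adds one contribution per order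
lemma foldl_stepB (s : List Int) (hs : s.Pairwise (· ≤ ·)) :
    ∀ (os : List Int) (total : Int) (j : Nat), os.Pairwise (· ≤ ·) →
      (∀ o ∈ os, j ≤ posC s o) →
      (os.foldl (stepB s) (total, j)).1 = total + (os.map (contribC s)).sum := by
  intro os
  induction os with
  | nil => intro total j _ _; simp
  | cons o t ih =>
    intro total j hp hj
    rcases List.pairwise_cons.mp hp with ⟨ho, ht⟩
    rw [List.foldl_cons, stepB_eq s o total j hs (hj o (by simp))]
    rw [ih (total + contribC s o) (posC s o) ht
      (fun o' ho' => posC_mono s (ho o' ho'))]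
    simp [List.map_cons, List.sum_cons]
    ring

-- A's per-order contribution is the same common contribution
lemma contribA_eq (s : List Int) (o : Int) (hs : s.Pairwise (· ≤ ·)) (hne : s ≠ []) :
    (let p := solveGo s o s.length 0 ((s.length : Int) - 1)
     min (o - PySem.List.pyGetD s p.1 0) (PySem.List.pyGetD s p.2 0 - o)) = contribC s o := by
  by_cases h1 : s.length = 1
  · have hgo : solveGo s o 1 0 0 = (0, 0) := by norm_num [solveGo]
    simp [contribC, h1, hgo]
  · have h2 : 2 ≤ s.length := by
      have : s.length ≠ 0 := by simpa using hne
      omega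
    have hpos : (0:Int) ≤ (posC s o : Int) := by positivity
    have hL := posC_le_length s o
    have hgo : solveGo s o s.length 0 ((s.length : Int) - 1) = (tIdx s o, tIdx s o + 1) := by
      apply solveGo_eq s o hs
      · omega
      · omega
      · omega
      · unfold tIdx; omega
      · unfold tIdx; omega
      · omega
    simp [hgo, contribC, h1]

lemma solve_eq_alt : ∀ (n : Int) (m : Int) (shops : List Int) (orders : List Int),
    (shops ≠ [] ∨ orders = []) → solve n m shops orders = solve_alt n m shops orders := by
  intro n m shops orders hpre
  rcases eq_or_ne shops [] with hnil | hne
  · rcases hpre with h | h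
    · exact absurd hnil h
    · subst h; subst hnil; rfl
  · set s := PySem.List.sorted shops (fun x => x) false with hsdef
    have hs : s.Pairwise (· ≤ ·) := PySem.List.sorted_pairwise shops (fun x => x)
    have hsne : s ≠ [] := by
      rw [hsdef, Ne, PySem.List.sorted_eq_nil_iff]; exact hne
    have hA : solve n m shops orders = 0 + (orders.map (contribC s)).sum := by
      simp only [solve, ← hsdef]
      rw [PySem.List.foldl_add]
      congr 1
      exact congrArg List.sum (List.map_congr_left (fun o _ => contribA_eq s o hs hsne))
    have hB : solve_alt n m shops orders
        = 0 + ((PySem.List.sorted orders (fun x => x) false).map (contribC s)).sum := by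
      simp only [solve_alt, ← hsdef]
      exact foldl_stepB s hs _ 0 0
        (PySem.List.sorted_pairwise orders (fun x => x))
        (fun o _ => Nat.zero_le _)
    rw [hA, hB]
    congr 1
    exact (((PySem.List.sorted_perm orders (fun x => x) false).map (contribC s)).sum_eq).symm

-- ===== VERDICT (by name: the statement is the Claim_ definition above) =====
theorem solve_spec : Claim_equal_solve := by
  intro n m shops orders _ hpre
  exact solve_eq_alt n m shops orders hpre
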